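-- pv_equiv track=rewrite | github.com/ddragonok/barker-code | main.py | gj
-- ===== SOURCE A (Python) =====
-- def fj(n, j, x):
--     f = 0
--     for i in range(n - j):
--         f += x[i] * x[i + j]
--     return f
--
-- def gj(n, x):
--     g = 0
--     for j in range(2 * n - 1):
--         if j <= n - 2:
--             g += (fj(n, j, x) ** 2 - x[n]) ** 2
--         else:
--             g += (x[j + 1 - n] ** 2 - 1) ** 2
--     return g
-- ===== SOURCE B (Python) =====
-- def gj(n, x):
--     # one pair-scan fills a lag-indexed accumulator array c (c[j] = autocorrelation at lag j)
--     c = [0] * n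
--     for i in range(n):
--         for k in range(i, n):
--             c[k - i] += x[i] * x[k]
--     g = 0
--     for j in range(n - 1):
--         g += (c[j] ** 2 - x[n]) ** 2
--     for i in range(n):
--         g += (x[i] ** 2 - 1) ** 2
--     return g
-- ===== Notes on version B (the rewrite author's own statement) =====
-- stated objective: alternative
-- what changed: Instead of recomputing each lag's autocorrelation with the helper fj inside the j-loop, B fills a lag-indexed accumulator array c in a single pair scan (c[k-i] += x[i]*x[k]) and then folds the penalty terms over c and x in two plain passes.
import Mathlib
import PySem

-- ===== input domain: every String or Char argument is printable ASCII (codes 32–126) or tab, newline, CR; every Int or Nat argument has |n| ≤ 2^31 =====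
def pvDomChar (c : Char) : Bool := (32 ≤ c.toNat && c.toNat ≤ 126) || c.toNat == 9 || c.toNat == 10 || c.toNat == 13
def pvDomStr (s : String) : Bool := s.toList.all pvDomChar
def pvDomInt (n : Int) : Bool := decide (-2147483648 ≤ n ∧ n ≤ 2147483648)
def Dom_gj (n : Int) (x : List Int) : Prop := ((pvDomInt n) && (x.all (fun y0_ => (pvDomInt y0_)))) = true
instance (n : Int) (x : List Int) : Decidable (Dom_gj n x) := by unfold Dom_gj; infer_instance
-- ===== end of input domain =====

-- B replaces A's per-lag helper fj with a single pair scan into a lag-indexed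
-- accumulator array, then two plain penalty passes (objective: alternative decomposition, same cost).

-- ===== PORT A =====
def fjPort (n j : Int) (x : List Int) : Int :=
  (PySem.List.pyRange 0 (n - j) 1).foldl
    (fun f i => f + PySem.List.pyGetD x i 0 * PySem.List.pyGetD x (i + j) 0) 0

def gj (n : Int) (x : List Int) : Int :=
  (PySem.List.pyRange 0 (2 * n - 1) 1).foldl
    (fun g j =>
      if j ≤ n - 2 then g + (fjPort n j x ^ 2 - PySem.List.pyGetD x n 0) ^ 2
      else g + (PySem.List.pyGetD x (j + 1 - n) 0 ^ 2 - 1) ^ 2) 0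

-- ===== PORT B =====
def gj_alt (n : Int) (x : List Int) : Int :=
  let c0 : List Int := List.replicate n.toNat 0
  let c := (PySem.List.pyRange 0 n 1).foldl
    (fun c i =>
      (PySem.List.pyRange i n 1).foldl
        (fun c k =>
          c.set (k - i).toNat
            (PySem.List.pyGetD c (k - i) 0 + PySem.List.pyGetD x i 0 * PySem.List.pyGetD x k 0))
        c)
    c0
  let g1 := (PySem.List.pyRange 0 (n - 1) 1).foldl
    (fun g j => g + (PySem.List.pyGetD c j 0 ^ 2 - PySem.List.pyGetD x n 0) ^ 2) 0
  (PySem.List.pyRange 0 n 1).foldl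
    (fun g i => g + (PySem.List.pyGetD x i 0 ^ 2 - 1) ^ 2) g1

-- ===== PRECONDITION & SPEC =====
-- Pre_ excludes exactly the inputs where A raises IndexError (x too short for the
-- indices x[0..n-1] and — when n ≥ 2 — x[n] that A reads); B raises there too.
def Pre_gj (n : Int) (x : List Int) : Prop :=
  n ≤ 0 ∨ (n = 1 ∧ 1 ≤ (x.length : Int)) ∨ (2 ≤ n ∧ n + 1 ≤ (x.length : Int))
instance (n : Int) (x : List Int) : Decidable (Pre_gj n x) := by unfold Pre_gj; infer_instance

def pvWitness_gj : Int × List Int := (2, [1, -1, 1])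

def Spec_gj (n : Int) (x : List Int) (out : Int) : Prop := out = gj_alt n x
instance (n : Int) (x : List Int) (out : Int) : Decidable (Spec_gj n x out) := by unfold Spec_gj; infer_instance

-- ===== CLAIM (what is proved, stated in full; the proofs are below) =====
def Claim_equal_gj : Prop := ∀ (n : Int) (x : List Int), Dom_gj n x → Pre_gj n x → Spec_gj n x (gj n x)

-- ===== LEMMAS AND PROOFS =====

-- any fold whose step is a List.set preserves the length
lemma foldl_set_length {α : Type} (l : List Int) (f : List α → Int → Nat) (g : List α → Int → α)
    (c : List α) : (l.foldl (fun c k => c.set (f c k) (g c k)) c).length = c.length := by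
  induction l generalizing c with
  | nil => rfl
  | cons h t ih => simp [List.foldl_cons, ih]

-- inner pair-scan pass for a fixed i: entry j gains x[i]*x[i+j] exactly when a ≤ i+j < b
lemma inner_get (x : List Int) (xi i : Int) :
    ∀ (m : Nat) (a b : Int) (c : List Int) (j : Int), (b - a).toNat ≤ m → i ≤ a → 0 ≤ j →
      j < (c.length : Int) → b ≤ i + (c.length : Int) →
      PySem.List.pyGetD
        ((PySem.List.pyRange a b 1).foldl
          (fun c k => c.set (k - i).toNat
            (PySem.List.pyGetD c (k - i) 0 + xi * PySem.List.pyGetD x k 0)) c) j 0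
      = PySem.List.pyGetD c j 0 +
          (if a ≤ i + j ∧ i + j < b then xi * PySem.List.pyGetD x (i + j) 0 else 0) := by
  intro m
  induction m with
  | zero =>
    intro a b c j hm hia hj0 hjlen hb
    have hba : b ≤ a := by omega
    rw [PySem.List.pyRange_one_eq_nil hba]
    simp only [List.foldl_nil]
    have : ¬ (a ≤ i + j ∧ i + j < b) := by omega
    simp [this]
  | succ m ih =>
    intro a b c j hm hia hj0 hjlen hb
    by_cases hab : a < b
    · rw [PySem.List.pyRange_one_cons hab]
      simp only [List.foldl_cons]
      set c' := c.set (a - i).toNat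
        (PySem.List.pyGetD c (a - i) 0 + xi * PySem.List.pyGetD x a 0) with hc'
      have hlen' : c'.length = c.length := by simp [hc']
      rw [ih (a + 1) b c' j (by omega) (by omega) hj0 (by omega) (by omega)]
      have hgj : PySem.List.pyGetD c' j 0
          = if i + j = a then PySem.List.pyGetD c (a - i) 0 + xi * PySem.List.pyGetD x a 0
            else PySem.List.pyGetD c j 0 := by
        rw [PySem.List.pyGetD_eq_getElem c' 0 hj0 (by omega)]
        by_cases hja : i + j = a
        · have hidx : j.toNat = (a - i).toNat := by omega
          have hlt : (a - i).toNat < c.length := by omega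
          simp [hc', hidx, List.getElem_set_self (h := by simpa using hlt), hja]
        · have hne : (a - i).toNat ≠ j.toNat := by omega
          rw [if_neg hja]
          simp only [hc']
          rw [List.getElem_set_ne hne]
          rw [PySem.List.pyGetD_eq_getElem c 0 hj0 hjlen]
      rw [hgj]
      by_cases hja : i + j = a
      · have h1 : ¬ (a + 1 ≤ i + j ∧ i + j < b) := by omega
        have h2 : (a ≤ i + j ∧ i + j < b) := by omega
        rw [if_pos hja, if_neg h1, if_pos h2]
        have : a - i = j := by omega
        rw [this, hja]
        ring
      · have hcond : (a + 1 ≤ i + j ∧ i + j < b) ↔ (a ≤ i + j ∧ i + j < b) := by omega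
        rw [if_neg hja, if_congr hcond rfl rfl]
    · rw [PySem.List.pyRange_one_eq_nil (by omega)]
      simp only [List.foldl_nil]
      have : ¬ (a ≤ i + j ∧ i + j < b) := by omega
      simp [this]

-- outer pair scan: entry j of the accumulator collects x[i]*x[i+j] over all i with i+j < n
lemma outer_get (x : List Int) (n : Int) :
    ∀ (m : Nat) (a : Int) (c : List Int) (j : Int), (n - a).toNat ≤ m → 0 ≤ a → 0 ≤ j →
      j < (c.length : Int) → n ≤ (c.length : Int) →
      PySem.List.pyGetD
        ((PySem.List.pyRange a n 1).foldl
          (fun c i =>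
            (PySem.List.pyRange i n 1).foldl
              (fun c k => c.set (k - i).toNat
                (PySem.List.pyGetD c (k - i) 0 + PySem.List.pyGetD x i 0 * PySem.List.pyGetD x k 0)) c)
          c) j 0
      = PySem.List.pyGetD c j 0 +
          ((PySem.List.pyRange a n 1).map
            (fun i => if i + j < n then PySem.List.pyGetD x i 0 * PySem.List.pyGetD x (i + j) 0 else 0)).sum := by
  intro m
  induction m with
  | zero =>
    intro a c j hm ha hj0 hjlen hn
    rw [PySem.List.pyRange_one_eq_nil (by omega)]
    simp
  | succ m ih =>
    intro a c j hm ha hj0 hjlen hn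
    by_cases han : a < n
    · rw [PySem.List.pyRange_one_cons han]
      simp only [List.foldl_cons, List.map_cons, List.sum_cons]
      set c' := (PySem.List.pyRange a n 1).foldl
        (fun c k => c.set (k - a).toNat
          (PySem.List.pyGetD c (k - a) 0 + PySem.List.pyGetD x a 0 * PySem.List.pyGetD x k 0)) c with hc'
      have hlen' : c'.length = c.length := by
        rw [hc']; exact foldl_set_length _ _ _ _
      rw [ih (a + 1) c' j (by omega) (by omega) hj0 (by omega) (by omega)]
      rw [hc', inner_get x (PySem.List.pyGetD x a 0) a ((n - a).toNat) a n c j (by omega) le_rfl hj0 hjlen (by omega)]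
      have hcond : (a ≤ a + j ∧ a + j < n) ↔ (a + j < n) := by omega
      rw [if_congr hcond rfl rfl]
      ring
    · rw [PySem.List.pyRange_one_eq_nil (by omega)]
      simp

-- the accumulator entry at lag j equals A's helper fj(n, j, x)
lemma c_eq_fj (x : List Int) (n j : Int) (h0 : 0 ≤ j) (hj : j < n) :
    PySem.List.pyGetD
      ((PySem.List.pyRange 0 n 1).foldl
        (fun c i =>
          (PySem.List.pyRange i n 1).foldl
            (fun c k => c.set (k - i).toNat
              (PySem.List.pyGetD c (k - i) 0 + PySem.List.pyGetD x i 0 * PySem.List.pyGetD x k 0)) c)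
        (List.replicate n.toNat 0)) j 0
    = fjPort n j x := by
  have hlen : ((List.replicate n.toNat (0 : Int)).length : Int) = n := by
    simp; omega
  rw [outer_get x n ((n - 0).toNat) 0 (List.replicate n.toNat 0) j le_rfl le_rfl h0
      (by rw [hlen]; exact hj) (by rw [hlen])]
  have hc0 : PySem.List.pyGetD (List.replicate n.toNat (0 : Int)) j 0 = 0 := by
    rw [PySem.List.pyGetD_eq_getElem _ 0 h0 (by rw [hlen]; exact hj)]
    simp
  rw [hc0, zero_add]
  rw [fjPort, PySem.List.foldl_add, zero_add]
  rw [PySem.List.pyRange_one_append 0 (n - j) n (by omega) (by omega)]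
  rw [List.map_append, List.sum_append]
  have h1 : ((PySem.List.pyRange 0 (n - j) 1).map
      (fun i => if i + j < n then PySem.List.pyGetD x i 0 * PySem.List.pyGetD x (i + j) 0 else 0))
      = (PySem.List.pyRange 0 (n - j) 1).map
        (fun i => PySem.List.pyGetD x i 0 * PySem.List.pyGetD x (i + j) 0) := by
    apply List.map_congr_left
    intro i hi
    rw [PySem.List.mem_pyRange_one] at hi
    rw [if_pos (by omega)]
  have h2 : ((PySem.List.pyRange (n - j) n 1).map
      (fun i => if i + j < n then PySem.List.pyGetD x i 0 * PySem.List.pyGetD x (i + j) 0 else 0))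
      = (PySem.List.pyRange (n - j) n 1).map (fun _ => (0 : Int)) := by
    apply List.map_congr_left
    intro i hi
    rw [PySem.List.mem_pyRange_one] at hi
    rw [if_neg (by omega)]
  rw [h1, h2]
  simp

-- ===== VERDICT (by name: the statement is the Claim_ definition above) =====
theorem gj_spec : Claim_equal_gj := by
  intro n x _ _
  unfold Spec_gj
  by_cases hn : n ≤ 0
  · rw [gj, gj_alt]
    rw [PySem.List.pyRange_one_eq_nil (by omega : (2 * n - 1 : Int) ≤ 0)]
    rw [PySem.List.pyRange_one_eq_nil (by omega : (n : Int) ≤ 0),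
        PySem.List.pyRange_one_eq_nil (by omega : (n - 1 : Int) ≤ 0)]
    rfl
  · rw [gj, gj_alt]
    -- A's loop body written as a single accumulation
    have hbody : ∀ (g j : Int),
        (if j ≤ n - 2 then g + (fjPort n j x ^ 2 - PySem.List.pyGetD x n 0) ^ 2
         else g + (PySem.List.pyGetD x (j + 1 - n) 0 ^ 2 - 1) ^ 2)
        = g + (if j ≤ n - 2 then (fjPort n j x ^ 2 - PySem.List.pyGetD x n 0) ^ 2
               else (PySem.List.pyGetD x (j + 1 - n) 0 ^ 2 - 1) ^ 2) := by
      intro g j; split_ifs <;> rfl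
    rw [PySem.List.foldl_congr_mem _ _
      (fun g j => g + (if j ≤ n - 2 then (fjPort n j x ^ 2 - PySem.List.pyGetD x n 0) ^ 2
                       else (PySem.List.pyGetD x (j + 1 - n) 0 ^ 2 - 1) ^ 2)) _
      (fun acc j _ => hbody acc j)]
    rw [PySem.List.foldl_add, PySem.List.foldl_add, PySem.List.foldl_add, zero_add, zero_add]
    rw [PySem.List.pyRange_one_append 0 (n - 1) (2 * n - 1) (by omega) (by omega)]
    rw [List.map_append, List.sum_append]
    congr 1
    · -- autocorrelation-penalty part
      apply congrArg
      apply List.map_congr_left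
      intro j hj
      rw [PySem.List.mem_pyRange_one] at hj
      rw [if_pos (by omega)]
      rw [c_eq_fj x n j (by omega) (by omega)]
    · -- magnitude-penalty part, reindexed j = (n-1)+k  vs  i = k
      rw [PySem.List.pyRange_one (n - 1) (2 * n - 1), PySem.List.pyRange_one 0 n]
      rw [List.map_map, List.map_map]
      apply congrArg
      have hN : (2 * n - 1 - (n - 1)).toNat = (n - 0).toNat := by omega
      rw [hN]
      apply List.map_congr_left
      intro k _
      simp only [Function.comp]
      rw [if_neg (by omega)]
      have h1 : (n - 1 + (k : Int)) + 1 - n = (k : Int) := by ring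
      have h2 : (0 : Int) + (k : Int) = (k : Int) := by ring
      rw [h1, h2]
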